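-- pv_equiv track=rewrite | github.com/hrsoup/CSMT2020_Code | Playing Techniques deconstruction and reconstruction/utils/word2staff.py | cal_techique
-- ===== SOURCE A (Python) =====
-- T = ['T','t','H','h','B','d','D','X','Y','y','Q','K','L','l','S','F','q','f','x']
--
-- def cal_techique(l,k,meter):
--     tec = []
--     no = []
--     mu = 0
--     tech = 0
--     for ch in l:
--         if (ch == '|') and (mu == 0):
--             mu = 1
--         elif (ch == '|') and (mu == 1):
--             mu = 0
--         elif mu == 1:
--             tec.append(ch)
--         elif mu == 0:
--             no.append(ch)
--     tec = ''.join(tec)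
--     no = ''.join(no)
--
--     for c in tec:
--         if (c in T) == True:
--             tech += 1
--
--     if tech == 0:
--         sta = '0'
--     else:
--         sta = tec
--     return no,sta
-- ===== SOURCE B (Python) =====
-- T = ['T','t','H','h','B','d','D','X','Y','y','Q','K','L','l','S','F','q','f','x']
-- _TSET = set(T)
--
-- def cal_techique(l, k, meter):
--     parts = l.split('|')
--     no = ''.join(parts[0::2])
--     tec = ''.join(parts[1::2])
--     sta = tec if any(c in _TSET for c in tec) else '0'
--     return no, sta
-- ===== Notes on version B (the rewrite author's own statement) =====
-- stated objective: simpler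
-- what changed: B replaces A's character-by-character bar-toggle state machine (mu flag, two accumulators, manual count loop) by split('|') with alternate joins for the outside/inside text and an any() membership test against a set of technique chars.
import Mathlib
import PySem

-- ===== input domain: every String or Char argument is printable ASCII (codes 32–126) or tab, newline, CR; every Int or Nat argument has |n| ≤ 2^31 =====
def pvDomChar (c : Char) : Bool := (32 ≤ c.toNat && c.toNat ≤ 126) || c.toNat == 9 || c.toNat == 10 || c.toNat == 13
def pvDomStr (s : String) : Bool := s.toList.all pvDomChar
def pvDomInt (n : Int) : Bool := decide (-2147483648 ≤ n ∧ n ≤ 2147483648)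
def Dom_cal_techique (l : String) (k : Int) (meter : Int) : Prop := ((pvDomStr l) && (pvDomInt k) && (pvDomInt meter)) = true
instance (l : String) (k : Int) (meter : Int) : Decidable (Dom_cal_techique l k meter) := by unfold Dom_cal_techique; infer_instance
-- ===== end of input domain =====

-- B replaces A's character-by-character bar-toggle state machine by split('|') +
-- alternate joins and an any-membership test against a set; objective: simpler.


-- ===== PORT A =====
-- module constant T
def pvT : List Char := ['T','t','H','h','B','d','D','X','Y','y','Q','K','L','l','S','F','q','f','x']

-- one step of A's for-loop over characters; state = (tec, no, mu)
def pvStepA (st : List Char × List Char × Int) (ch : Char) : List Char × List Char × Int :=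
  if ch = '|' ∧ st.2.2 = 0 then (st.1, st.2.1, 1)
  else if ch = '|' ∧ st.2.2 = 1 then (st.1, st.2.1, 0)
  else if st.2.2 = 1 then (st.1 ++ [ch], st.2.1, st.2.2)
  else if st.2.2 = 0 then (st.1, st.2.1 ++ [ch], st.2.2)
  else (st.1, st.2.1, st.2.2)

def cal_techique (l : String) (k : Int) (meter : Int) : String × String :=
  let st := l.toList.foldl pvStepA ([], [], 0)
  let tec := st.1
  let no := st.2.1
  let tech : Int := tec.foldl (fun tech c => if c ∈ pvT then tech + 1 else tech) 0
  let sta := if tech = 0 then "0" else String.ofList tec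
  (String.ofList no, sta)

-- ===== PORT B =====
-- l.split('|') (single-character separator), ported step for step
def pvSplitBar : List Char → List (List Char)
  | [] => [[]]
  | c :: cs =>
    match pvSplitBar cs with
    | [] => [[]]
    | p :: ps => if c = '|' then [] :: p :: ps else (c :: p) :: ps

-- parts[0::2] / parts[1::2]
mutual
def pvEvens : List (List Char) → List (List Char)
  | [] => []
  | x :: xs => x :: pvOdds xs
def pvOdds : List (List Char) → List (List Char)
  | [] => []
  | _ :: xs => pvEvens xs
end

-- _TSET = set(T)
def pvTSet : PySem.Set Char := PySem.Set.ofList pvT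

def cal_techique_alt (l : String) (k : Int) (meter : Int) : String × String :=
  let parts := pvSplitBar l.toList
  let no := (pvEvens parts).flatten
  let tec := (pvOdds parts).flatten
  let sta := if tec.any (fun c => pvTSet.contains c) then String.ofList tec else "0"
  (String.ofList no, sta)

-- ===== PRECONDITION & SPEC =====
def Spec_cal_techique (l : String) (k : Int) (meter : Int) (out : String × String) : Prop := out = cal_techique_alt l k meter
instance (l : String) (k : Int) (meter : Int) (out : String × String) : Decidable (Spec_cal_techique l k meter out) := by unfold Spec_cal_techique; infer_instance

-- ===== CLAIM (what is proved, stated in full; the proofs are below) =====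
def Claim_equal_cal_techique : Prop := ∀ (l : String) (k : Int) (meter : Int), Dom_cal_techique l k meter → Spec_cal_techique l k meter (cal_techique l k meter)

-- ===== LEMMAS AND PROOFS =====

lemma pvSplitBar_ne_nil (cs : List Char) : pvSplitBar cs ≠ [] := by
  cases cs with
  | nil => simp [pvSplitBar]
  | cons c cs =>
    simp only [pvSplitBar]
    split
    · simp
    · split <;> simp

-- final value of A's toggle state after a character list, starting from phase b
def pvMu (cs : List Char) (b : Int) : Int :=
  cs.foldl (fun m c => if c = '|' then 1 - m else m) b

-- the bar-toggle loop computes exactly the alternate joins of the split (both phases at once)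
lemma pvLoop_eq (cs : List Char) : ∀ tec no : List Char,
    cs.foldl pvStepA (tec, no, 0) =
      (tec ++ (pvOdds (pvSplitBar cs)).flatten, no ++ (pvEvens (pvSplitBar cs)).flatten, pvMu cs 0) ∧
    cs.foldl pvStepA (tec, no, 1) =
      (tec ++ (pvEvens (pvSplitBar cs)).flatten, no ++ (pvOdds (pvSplitBar cs)).flatten, pvMu cs 1) := by
  induction cs with
  | nil => intro tec no; simp [pvSplitBar, pvEvens, pvOdds, pvMu]
  | cons c cs ih =>
    intro tec no
    obtain ⟨p, ps, hps⟩ := List.exists_cons_of_ne_nil (pvSplitBar_ne_nil cs)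
    by_cases hc : c = '|'
    · subst hc
      constructor
      · have h := (ih tec no).2
        simp only [List.foldl_cons, pvStepA, pvSplitBar, hps, pvMu] at *
        simpa [pvEvens, pvOdds, hps] using h
      · have h := (ih tec no).1
        simp only [List.foldl_cons, pvStepA, pvSplitBar, hps, pvMu] at *
        simpa [pvEvens, pvOdds, hps] using h
    · constructor
      · have h := (ih tec (no ++ [c])).1
        simp only [List.foldl_cons, pvStepA, hc, pvSplitBar, hps, pvMu] at *
        simp only [pvEvens, pvOdds] at *
        simpa [List.append_assoc] using h
      · have h := (ih (tec ++ [c]) no).2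
        simp only [List.foldl_cons, pvStepA, hc, pvSplitBar, hps, pvMu] at *
        simp only [pvEvens, pvOdds] at *
        simpa [List.append_assoc] using h

lemma pvTech_eq (tec : List Char) : ∀ t0 : Int,
    tec.foldl (fun tech c => if c ∈ pvT then tech + 1 else tech) t0
      = t0 + (tec.countP (fun c => decide (c ∈ pvT)) : Int) := by
  induction tec with
  | nil => intro t0; simp
  | cons c tec ih =>
    intro t0
    by_cases hc : c ∈ pvT <;> simp [hc, ih] <;> ring

lemma pvContains_eq (c : Char) : pvTSet.contains c = decide (c ∈ pvT) := by
  have h : pvTSet = pvT := by decide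
  simp [PySem.Set.contains, h]

lemma pvAny_iff (tec : List Char) :
    tec.any (fun c => pvTSet.contains c) = true ↔ tec.countP (fun c => decide (c ∈ pvT)) ≠ 0 := by
  simp only [pvContains_eq, List.any_eq_true, ← List.countP_pos_iff]
  omega

-- ===== VERDICT (by name: the statement is the Claim_ definition above) =====
theorem cal_techique_spec : Claim_equal_cal_techique := by
  intro l k meter _
  unfold Spec_cal_techique cal_techique cal_techique_alt
  have hloop := (pvLoop_eq l.toList [] []).1
  simp only [hloop, List.nil_append]
  have htech := pvTech_eq (pvOdds (pvSplitBar l.toList)).flatten 0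
  simp only [htech, zero_add]
  by_cases h : (pvOdds (pvSplitBar l.toList)).flatten.any (fun c => pvTSet.contains c) = true
  · have hc := (pvAny_iff _).mp h
    have hne : ¬ (((pvOdds (pvSplitBar l.toList)).flatten.countP (fun c => decide (c ∈ pvT)) : Int) = 0) := by
      exact_mod_cast hc
    rw [if_neg hne, if_pos h]
  · have hc : (pvOdds (pvSplitBar l.toList)).flatten.countP (fun c => decide (c ∈ pvT)) = 0 := by
      by_contra hn; exact h ((pvAny_iff _).mpr hn)
    have heq : (((pvOdds (pvSplitBar l.toList)).flatten.countP (fun c => decide (c ∈ pvT)) : Int) = 0) := by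
      exact_mod_cast hc
    rw [if_pos heq, if_neg h]
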